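-- pv_equiv track=rewrite | github.com/nikoliazekter/InformationSecurity | Assignment 2/helpers.py | stream_to_blocks
-- ===== SOURCE A (Python) =====
-- import itertools
--
-- def stream_to_blocks(stream, n, padding=False):
--     stream = iter(stream)
--     while True:
--         new_block = list(itertools.islice(stream, n))
--         if len(new_block) < n:
--             if padding:
--                 new_block = pad(new_block, n)
--                 yield new_block
--             return
--         yield new_block
--
-- def pad(block, n):
--     padding_len = n - len(block)
--     return block + [padding_len] * padding_len
-- ===== SOURCE B (Python) =====
-- def stream_to_blocks(stream, n, padding=False):
--     buf = []
--     for x in stream: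
--         buf.append(x)
--         if len(buf) == n:
--             yield buf
--             buf = []
--     if padding:
--         yield pad(buf, n)
--
-- def pad(block, n):
--     padding_len = n - len(block)
--     return block + [padding_len] * padding_len
-- ===== Notes on version B (the rewrite author's own statement) =====
-- stated objective: simpler
-- what changed: Replaces the while-loop of repeated itertools.islice slices with a single element-by-element pass that appends to a buffer and emits it whenever it reaches length n.
import Mathlib
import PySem

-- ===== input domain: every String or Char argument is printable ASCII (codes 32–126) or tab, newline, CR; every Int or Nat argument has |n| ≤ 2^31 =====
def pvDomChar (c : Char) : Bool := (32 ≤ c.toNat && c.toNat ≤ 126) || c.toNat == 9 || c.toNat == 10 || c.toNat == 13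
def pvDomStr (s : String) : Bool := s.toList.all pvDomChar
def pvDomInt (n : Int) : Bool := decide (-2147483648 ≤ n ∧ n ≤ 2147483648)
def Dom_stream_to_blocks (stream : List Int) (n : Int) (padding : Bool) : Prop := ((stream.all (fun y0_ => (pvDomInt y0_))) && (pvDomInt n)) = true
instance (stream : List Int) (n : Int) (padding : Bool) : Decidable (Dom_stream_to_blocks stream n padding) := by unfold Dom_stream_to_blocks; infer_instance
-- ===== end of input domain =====

-- B replaces A's repeated itertools.islice while-loop with a single element-by-element
-- buffer pass (simpler decomposition, same cost); both are generators, compared as lists of blocks.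


-- ===== PORT A =====
-- pad(block, n) = block + [padding_len] * padding_len
def pvPad (block : List Int) (n : Int) : List Int :=
  block ++ List.replicate (n - (block.length : Int)).toNat (n - (block.length : Int))

-- the while-True loop: each round takes islice(stream, n); fuel = |stream| + 1 is only a
-- totality guard (inside Pre_ each continuing round consumes n ≥ 1 elements, so fuel suffices)
def stream_to_blocks_go (n : Int) (padding : Bool) : List Int → Nat → List (List Int)
  | _, 0 => []
  | s, fuel + 1 =>
    let new_block := s.take n.toNat   -- islice(stream, n); exact for n ≥ 0 (Pre_ gives n ≥ 1)
    if (new_block.length : Int) < n then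
      (if padding then [pvPad new_block n] else [])
    else
      new_block :: stream_to_blocks_go n padding (s.drop n.toNat) fuel

def stream_to_blocks (stream : List Int) (n : Int) (padding : Bool) : List (List Int) :=
  stream_to_blocks_go n padding stream (stream.length + 1)

-- ===== PORT B =====
def pvPadAlt (block : List Int) (n : Int) : List Int :=
  block ++ List.replicate (n - (block.length : Int)).toNat (n - (block.length : Int))

-- one pass: append each element to buf, emit buf when it reaches length n
def stream_to_blocks_alt (stream : List Int) (n : Int) (padding : Bool) : List (List Int) :=
  let st := stream.foldl
    (fun (acc : List (List Int) × List Int) x =>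
      let buf := acc.2 ++ [x]
      if (buf.length : Int) = n then (acc.1 ++ [buf], []) else (acc.1, buf))
    ([], [])
  if padding then st.1 ++ [pvPadAlt st.2 n] else st.1

-- ===== PRECONDITION & SPEC =====
-- Pre_ excludes n ≤ 0: for n < 0 Python A raises ValueError (islice rejects negative
-- counts) and for n = 0 A loops forever; A returns no value there.
def Pre_stream_to_blocks (stream : List Int) (n : Int) (padding : Bool) : Prop := 1 ≤ n
instance (stream : List Int) (n : Int) (padding : Bool) : Decidable (Pre_stream_to_blocks stream n padding) := by unfold Pre_stream_to_blocks; infer_instance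
def pvWitness_stream_to_blocks : List Int × Int × Bool := ([1, 2, 3], 2, true)

def Spec_stream_to_blocks (stream : List Int) (n : Int) (padding : Bool) (out : List (List Int)) : Prop := out = stream_to_blocks_alt stream n padding
instance (stream : List Int) (n : Int) (padding : Bool) (out : List (List Int)) : Decidable (Spec_stream_to_blocks stream n padding out) := by unfold Spec_stream_to_blocks; infer_instance

-- ===== CLAIM (what is proved, stated in full; the proofs are below) =====
def Claim_equal_stream_to_blocks : Prop := ∀ (stream : List Int) (n : Int) (padding : Bool), Dom_stream_to_blocks stream n padding → Pre_stream_to_blocks stream n padding → Spec_stream_to_blocks stream n padding (stream_to_blocks stream n padding)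

-- ===== LEMMAS AND PROOFS =====

-- proof-only abbreviations for B's fold step and its finishing stage
def pvStep (n : Int) (acc : List (List Int) × List Int) (x : Int) : List (List Int) × List Int :=
  let buf := acc.2 ++ [x]
  if (buf.length : Int) = n then (acc.1 ++ [buf], []) else (acc.1, buf)

def pvFinish (n : Int) (padding : Bool) (st : List (List Int) × List Int) : List (List Int) :=
  if padding then st.1 ++ [pvPadAlt st.2 n] else st.1

-- B's fold from state (blocks, buf) with |buf| < n produces blocks ++ (A's loop on buf ++ s).
theorem foldl_eq_go (n : Int) (padding : Bool) (hn : 1 ≤ n) :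
    ∀ (s buf : List Int) (blocks : List (List Int)) (fuel : Nat),
      (buf.length : Int) < n → s.length + 1 ≤ fuel →
      pvFinish n padding (s.foldl (pvStep n) (blocks, buf))
      = blocks ++ stream_to_blocks_go n padding (buf ++ s) fuel := by
  intro s
  induction s with
  | nil =>
    intro buf blocks fuel hbuf hfuel
    obtain ⟨f, rfl⟩ : ∃ f, fuel = f + 1 := ⟨fuel - 1, by omega⟩
    simp only [List.foldl_nil, List.append_nil, stream_to_blocks_go]
    rw [List.take_of_length_le (by omega)]
    rw [if_pos hbuf]
    cases padding <;> simp [pvFinish, pvPad, pvPadAlt]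
  | cons x t ih =>
    intro buf blocks fuel hbuf hfuel
    obtain ⟨f, rfl⟩ : ∃ f, fuel = f + 1 := ⟨fuel - 1, by omega⟩
    have hbuf' : (buf.length : Int) + 1 = ((buf ++ [x]).length : Int) := by simp
    have hassoc : buf ++ x :: t = (buf ++ [x]) ++ t := by simp
    rw [hassoc]
    by_cases hful : ((buf ++ [x]).length : Int) = n
    · have hlen : (buf ++ [x]).length = n.toNat := by omega
      simp only [List.foldl_cons, pvStep, hful, if_pos]
      rw [stream_to_blocks_go, List.take_left' hlen, List.drop_left' hlen,
        if_neg (by omega)]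
      have := ih [] (blocks ++ [buf ++ [x]]) f (by simpa using hn) (by simp at hfuel ⊢; omega)
      simp only [List.nil_append] at this
      rw [this]; simp
    · have hlt : ((buf ++ [x]).length : Int) < n := by omega
      simp only [List.foldl_cons, pvStep, hful, ite_false]
      exact ih (buf ++ [x]) blocks (f + 1) hlt (by simp at hfuel ⊢; omega)

-- ===== VERDICT (by name: the statement is the Claim_ definition above) =====
theorem stream_to_blocks_spec : Claim_equal_stream_to_blocks := by
  intro stream n padding _ hpre
  unfold Spec_stream_to_blocks stream_to_blocks stream_to_blocks_alt
  have h := foldl_eq_go n padding hpre stream [] [] (stream.length + 1)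
    (by simpa using hpre) le_rfl
  simp only [pvFinish, List.nil_append] at h
  exact h.symm
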